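-- pv_equiv track=rewrite | github.com/K-Y-k/Coding_Test_Python_SQL | 프로그래머스/Lv0/삼각형의 완성조건 (2)-각 케이스 구하기.py | solution
-- ===== SOURCE A (Python) =====
-- def solution(sides):
--     answer = 0
--
--     sides_max = max(sides)
--     sides_min = min(sides)
--
--     # sides에 있는 선분이 가장 긴 경우
--     new_sides = sides_max - sides_min + 1   # sides에 있는 선분이 가장 긴 경우일 때의 새로운 선분을 최소의 값부터 적용
--     sides_max_count = 0                     # 카운팅할 변수 초기화 및 선언
--
--     for i in range(new_sides, sides_max+1): # 최소 값부터 최대 값까지 카운팅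
--         sides_max_count += 1
--
--     answer += sides_max_count               # 정답에 적용
--
--
--     # sides에 없는 새로운 선분이 가장 긴 경우
--     new_sides_max = sides_max+1                      # 새로운 선분이 가장 긴 경우의 새로운 선분을 최소의 값부터 적용
--
--     if new_sides_max < sides_max+ sides_min:         # 새로운 선분이 가장 긴 경우가 가능한 sides인 경우
--         new_sides_max_count = 0                      # 카운팅할 변수 초기화 및 선언
--
--         while new_sides_max < sides_max + sides_min: # 삼각형의 조건이 안될 때까지 반복하여 카운팅
--             new_sides_max_count += 1
--             new_sides_max += 1
--
--         answer += new_sides_max_count                # 정답에 적용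
--
--
--     return answer
-- ===== SOURCE B (Python) =====
-- def solution(sides):
--     m = min(sides)
--     return max(0, m) + max(0, m - 1)
-- ===== Notes on version B (the rewrite author's own statement) =====
-- stated objective: simpler
-- what changed: Both counting loops collapse algebraically to a closed form in min(sides) alone: the answer is max(0,m)+max(0,m-1) where m = min(sides), so B is a two-line expression with no loops (the O(n) min scan dominates either way on measured inputs).
import Mathlib
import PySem

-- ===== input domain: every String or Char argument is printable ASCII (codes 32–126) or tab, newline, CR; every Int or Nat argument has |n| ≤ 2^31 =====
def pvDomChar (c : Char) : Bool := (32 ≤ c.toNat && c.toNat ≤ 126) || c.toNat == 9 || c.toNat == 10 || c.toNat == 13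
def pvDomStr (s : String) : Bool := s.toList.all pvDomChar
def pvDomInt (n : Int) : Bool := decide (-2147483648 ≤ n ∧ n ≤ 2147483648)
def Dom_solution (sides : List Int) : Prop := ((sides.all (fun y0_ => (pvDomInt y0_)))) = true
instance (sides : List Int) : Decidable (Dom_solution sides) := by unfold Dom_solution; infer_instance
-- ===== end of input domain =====

-- B: both counting loops collapse to a closed form in min(sides); simpler, same measured cost (the min scan dominates).

-- ===== PORT A =====
-- the while loop: counts increments of x until x reaches limit
def solutionWhile (x limit : Int) : Int :=
  if _h : x < limit then 1 + solutionWhile (x + 1) limit else 0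
termination_by (limit - x).toNat
decreasing_by omega

def solution (sides : List Int) : Int :=
  match PySem.List.max? sides (fun y => y), PySem.List.min? sides (fun y => y) with
  | some sides_max, some sides_min =>
    let new_sides := sides_max - sides_min + 1
    let sides_max_count :=
      (PySem.List.pyRange new_sides (sides_max + 1) 1).foldl (fun c _ => c + 1) 0
    let answer := 0 + sides_max_count
    let new_sides_max := sides_max + 1
    if new_sides_max < sides_max + sides_min then
      answer + solutionWhile new_sides_max (sides_max + sides_min)
    else answer
  | _, _ => 0   -- unreachable under Pre_ (max/min raise ValueError on [])

-- ===== PORT B =====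
def solution_alt (sides : List Int) : Int :=
  match PySem.List.min? sides (fun y => y) with
  | some m => max 0 m + max 0 (m - 1)
  | none => 0   -- unreachable under Pre_ (min raises ValueError on [])

-- ===== PRECONDITION & SPEC =====
-- Pre_ excludes the empty list, on which A raises ValueError (and B would too).
def Pre_solution (sides : List Int) : Prop := sides ≠ []
instance (sides : List Int) : Decidable (Pre_solution sides) := by unfold Pre_solution; infer_instance
def pvWitness_solution : List Int := ([3, 4])

def Spec_solution (sides : List Int) (out : Int) : Prop := out = solution_alt sides
instance (sides : List Int) (out : Int) : Decidable (Spec_solution sides out) := by unfold Spec_solution; infer_instance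

-- ===== CLAIM (what is proved, stated in full; the proofs are below) =====
def Claim_equal_solution : Prop := ∀ (sides : List Int), Dom_solution sides → Pre_solution sides → Spec_solution sides (solution sides)

-- ===== LEMMAS AND PROOFS =====

theorem solutionWhile_eq (x limit : Int) : solutionWhile x limit = max 0 (limit - x) := by
  unfold solutionWhile
  split
  · have := solutionWhile_eq (x + 1) limit
    rw [this]; omega
  · omega
termination_by (limit - x).toNat
decreasing_by omega

theorem foldl_count (l : List Int) (c : Int) :
    l.foldl (fun c _ => c + 1) c = c + l.length := by
  induction l generalizing c with
  | nil => simp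
  | cons a t ih => simp [List.foldl, ih]; omega

theorem foldl_min_le (s : List Int) (y : Int) : List.foldl min y s ≤ y := by
  induction s generalizing y with
  | nil => simp
  | cons b s ihs => exact le_trans (ihs (min y b)) (min_le_left y b)

theorem le_foldl_max (s : List Int) (y : Int) : y ≤ List.foldl max y s := by
  induction s generalizing y with
  | nil => simp
  | cons b s ihs => exact le_trans (le_max_left y b) (ihs (max y b))

-- ===== VERDICT (by name: the statement is the Claim_ definition above) =====
theorem solution_spec : Claim_equal_solution := by
  intro sides _ hpre
  unfold Spec_solution solution solution_alt
  obtain ⟨x, t, rfl⟩ : ∃ x t, sides = x :: t := by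
    cases sides with
    | nil => exact absurd rfl hpre
    | cons x t => exact ⟨x, t, rfl⟩
  rw [PySem.List.max?_id_cons, PySem.List.min?_id_cons]
  simp only
  rw [foldl_count, PySem.List.length_pyRange_one, solutionWhile_eq]
  have hle : t.foldl min x ≤ t.foldl max x :=
    le_trans (foldl_min_le t x) (le_foldl_max t x)
  set M := t.foldl max x
  set m := t.foldl min x
  split_ifs with h
  · omega
  · omega
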